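-- pv_equiv track=rewrite | github.com/NikunjVashishtha/CustardPython | CustardPython.py | insert_before
-- ===== SOURCE A (Python) =====
-- def insert_before(dictionary: dict, before_key: str, insert_key: str, insert_value) -> dict:
--     '''Return a new dictionary with a key-value pair inserted before a specified key.
--
--     Args:
--         dictionary (dict): The original dictionary.
--         before_key (str): The key before which to insert.
--         insert_key (str): The key to insert.
--         insert_value: The value to insert.
--
--     Returns:
--         dict: A new dictionary with the key-value pair inserted.
--     '''
--     main_dict = dict(dictionary)
--     new_dict = {}
--     inserted = False
--     for key in main_dict:
--         if key == before_key and not inserted: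
--             new_dict[insert_key] = insert_value
--             inserted = True
--         new_dict[key] = main_dict[key]
--     if not inserted:
--         new_dict[insert_key] = insert_value
--     return new_dict
-- ===== SOURCE B (Python) =====
-- def insert_before(dictionary: dict, before_key: str, insert_key: str, insert_value) -> dict:
--     '''Return a new dictionary with a key-value pair inserted before a specified key.'''
--     items = list(dictionary.items())
--     if before_key in dictionary:
--         idx = list(dictionary).index(before_key)
--     else:
--         idx = len(items)
--     return dict(items[:idx] + [(insert_key, insert_value)] + items[idx:])
-- ===== Notes on version B (the rewrite author's own statement) =====
-- stated objective: idiomatic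
-- what changed: Replaces A's flag-carrying key loop that rebuilds the dict entry by entry with a find-index-and-splice on the items list, relying on dict()'s duplicate-key semantics (first position, last value) for the overwrite cases.
import Mathlib
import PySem

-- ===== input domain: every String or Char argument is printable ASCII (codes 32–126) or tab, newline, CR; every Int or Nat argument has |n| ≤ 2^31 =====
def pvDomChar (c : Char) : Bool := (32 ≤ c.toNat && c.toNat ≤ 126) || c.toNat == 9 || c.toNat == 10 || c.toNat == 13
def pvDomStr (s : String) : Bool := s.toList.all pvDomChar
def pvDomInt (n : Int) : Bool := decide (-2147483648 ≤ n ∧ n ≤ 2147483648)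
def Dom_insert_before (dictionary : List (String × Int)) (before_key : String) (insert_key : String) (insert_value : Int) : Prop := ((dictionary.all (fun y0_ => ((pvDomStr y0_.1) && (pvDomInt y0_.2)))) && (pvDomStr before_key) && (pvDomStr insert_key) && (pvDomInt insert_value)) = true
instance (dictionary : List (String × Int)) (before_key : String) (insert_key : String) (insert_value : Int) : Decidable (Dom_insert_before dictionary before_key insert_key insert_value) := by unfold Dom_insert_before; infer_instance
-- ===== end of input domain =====

-- B replaces A's flag-carrying rebuild loop with find-index-and-splice on the items list (idiomatic, same cost).


-- ===== PORT A =====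
def insert_before (dictionary : List (String × Int)) (before_key : String) (insert_key : String) (insert_value : Int) : List (String × Int) :=
  let main_dict := PySem.Dict.ofList dictionary
  -- for key in main_dict: ... ; state = (new_dict, inserted)
  let st := main_dict.items.foldl
    (fun (st : PySem.Dict String Int × Bool) p =>
      let st1 := if p.1 == before_key && !st.2
        then (st.1.insert insert_key insert_value, true) else st
      -- main_dict[key]: the key is always present while iterating main_dict, so getD is exact here
      (st1.1.insert p.1 (main_dict.getD p.1 0), st1.2))
    (PySem.Dict.empty, false)
  let new_dict := if !st.2 then st.1.insert insert_key insert_value else st.1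
  new_dict.items

-- ===== PORT B =====
def insert_before_alt (dictionary : List (String × Int)) (before_key : String) (insert_key : String) (insert_value : Int) : List (String × Int) :=
  let d := PySem.Dict.ofList dictionary
  let items := d.items
  -- idx = list(dictionary).index(before_key) if present (index? is some then), else len(items)
  let idx : Nat := if d.contains before_key
    then (PySem.List.index? d.keys before_key).getD 0 else items.length
  (PySem.Dict.ofList (PySem.List.slice items none (some (idx : Int))
      ++ [(insert_key, insert_value)] ++ PySem.List.slice items (some (idx : Int)) none)).items

-- ===== PRECONDITION & SPEC =====
def Spec_insert_before (dictionary : List (String × Int)) (before_key : String) (insert_key : String) (insert_value : Int) (out : List (String × Int)) : Prop := out = insert_before_alt dictionary before_key insert_key insert_value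
instance (dictionary : List (String × Int)) (before_key : String) (insert_key : String) (insert_value : Int) (out : List (String × Int)) : Decidable (Spec_insert_before dictionary before_key insert_key insert_value out) := by unfold Spec_insert_before; infer_instance

-- ===== CLAIM (what is proved, stated in full; the proofs are below) =====
def Claim_equal_insert_before : Prop := ∀ (dictionary : List (String × Int)) (before_key : String) (insert_key : String) (insert_value : Int), Dom_insert_before dictionary before_key insert_key insert_value → Spec_insert_before dictionary before_key insert_key insert_value (insert_before dictionary before_key insert_key insert_value)

-- ===== LEMMAS AND PROOFS =====

-- the two fold bodies, named for the proofs only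
def pvStep (before_key insert_key : String) (insert_value : Int)
    (st : PySem.Dict String Int × Bool) (p : String × Int) : PySem.Dict String Int × Bool :=
  let st1 := if p.1 == before_key && !st.2
    then (st.1.insert insert_key insert_value, true) else st
  (st1.1.insert p.1 p.2, st1.2)

def pvIns (D : PySem.Dict String Int) (p : String × Int) : PySem.Dict String Int :=
  D.insert p.1 p.2

theorem pv_ofList_eq_foldl (l : List (String × Int)) :
    PySem.Dict.ofList l = l.foldl pvIns PySem.Dict.empty := rfl

-- fold while inserted = false and before_key never matches: plain inserts, flag stays false
theorem pv_fold_false (bk ik : String) (iv : Int) (l : List (String × Int))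
    (D : PySem.Dict String Int) (h : ∀ p ∈ l, p.1 ≠ bk) :
    l.foldl (pvStep bk ik iv) (D, false) = (l.foldl pvIns D, false) := by
  induction l generalizing D with
  | nil => rfl
  | cons q t ih =>
    have hq : q.1 ≠ bk := h q (by simp)
    simp only [List.foldl_cons, pvStep, pvIns]
    rw [if_neg (by simp [hq])]
    exact ih _ (fun p hp => h p (by simp [hp]))

-- fold once inserted = true: plain inserts, flag stays true
theorem pv_fold_true (bk ik : String) (iv : Int) (l : List (String × Int))
    (D : PySem.Dict String Int) :
    l.foldl (pvStep bk ik iv) (D, true) = (l.foldl pvIns D, true) := by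
  induction l generalizing D with
  | nil => rfl
  | cons q t ih =>
    simp only [List.foldl_cons, pvStep, pvIns]
    rw [if_neg (by simp)]
    exact ih _

theorem insert_before_spec_aux (dictionary : List (String × Int)) (before_key : String)
    (insert_key : String) (insert_value : Int) :
    insert_before dictionary before_key insert_key insert_value
      = insert_before_alt dictionary before_key insert_key insert_value := by
  unfold insert_before insert_before_alt
  set d := PySem.Dict.ofList dictionary with hd
  have hnd : d.keys.Nodup := PySem.Dict.nodup_keys_ofList dictionary
  have hkeys : d.keys = d.items.map Prod.fst := rfl
  -- replace the getD lookup by the pair's own value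
  have hcongr : d.items.foldl
      (fun (st : PySem.Dict String Int × Bool) p =>
        let st1 := if p.1 == before_key && !st.2
          then (st.1.insert insert_key insert_value, true) else st
        (st1.1.insert p.1 (d.getD p.1 0), st1.2))
      (PySem.Dict.empty, false)
      = d.items.foldl (pvStep before_key insert_key insert_value) (PySem.Dict.empty, false) := by
    apply PySem.List.foldl_congr_mem
    intro acc p hp
    obtain ⟨k, v⟩ := p
    have : d.getD k 0 = v := PySem.Dict.getD_of_mem_items d hp hnd 0
    simp [pvStep, this]
  simp only []
  rw [hcongr]
  by_cases hct : d.contains before_key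
  · -- before_key present: split items at its index
    obtain ⟨k, hk⟩ := Option.isSome_iff_exists.mp
      ((PySem.List.index?_isSome_iff d.keys before_key).mpr
        ((PySem.Dict.contains_iff_mem_keys d before_key).mp hct))
    obtain ⟨preK, sufK, hsplit, hlen, hnotin⟩ :=
      (PySem.List.index?_eq_some_iff d.keys before_key k).mp hk
    have hklt : k < d.items.length := by
      have h1 : d.keys.length = d.items.length := by simp [hkeys]
      have h2 : k < d.keys.length := by rw [hsplit]; simp [← hlen]
      omega
    rw [if_pos hct, hk, Option.getD_some,
        PySem.List.slice_to_natCast, PySem.List.slice_from_natCast]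
    obtain ⟨q, post, hrest⟩ : ∃ q post, d.items.drop k = q :: post := by
      cases h : d.items.drop k with
      | nil => exact absurd (List.drop_eq_nil_iff.mp h) (by omega)
      | cons q post => exact ⟨q, post, rfl⟩
    have hmpre : (d.items.take k).map Prod.fst = preK := by
      rw [List.map_take, ← hkeys, hsplit, ← hlen, List.take_left]
    have hq1 : q.1 = before_key := by
      have h1 : (d.items.map Prod.fst).drop k = before_key :: sufK := by
        rw [← hkeys, hsplit, ← hlen, List.drop_left]
      rw [← List.map_drop, hrest, List.map_cons] at h1
      exact (List.cons.injEq _ _ _ _).mp h1 |>.1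
    have hpre : ∀ p ∈ d.items.take k, p.1 ≠ before_key := by
      intro p hp hpe
      exact hnotin (hmpre ▸ hpe ▸ List.mem_map_of_mem hp)
    have hfold : List.foldl (pvStep before_key insert_key insert_value)
        (PySem.Dict.empty, false) d.items
        = (post.foldl pvIns
            ((((d.items.take k).foldl pvIns PySem.Dict.empty).insert insert_key
              insert_value).insert q.1 q.2), true) := by
      conv_lhs => rw [← List.take_append_drop k d.items, hrest]
      rw [List.foldl_append, pv_fold_false _ _ _ _ _ hpre, List.foldl_cons]
      have hstep : pvStep before_key insert_key insert_value
          ((d.items.take k).foldl pvIns PySem.Dict.empty, false) q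
          = ((((d.items.take k).foldl pvIns PySem.Dict.empty).insert insert_key
              insert_value).insert q.1 q.2, true) := by
        simp [pvStep, hq1]
      rw [hstep, pv_fold_true]
    rw [hfold, hrest]
    simp only [Bool.not_true, Bool.false_eq_true, if_false]
    rw [pv_ofList_eq_foldl]
    simp [pvIns, List.foldl_append]
  · -- before_key absent: flag never set; append at the end
    have hnm : ∀ p ∈ d.items, p.1 ≠ before_key := by
      intro p hp hpe
      exact hct ((PySem.Dict.contains_iff_mem_keys d before_key).mpr
        (hpe ▸ (by rw [hkeys]; exact List.mem_map_of_mem hp)))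
    rw [pv_fold_false _ _ _ _ _ hnm, pv_ofList_eq_foldl]
    simp [pvIns, hct]

-- ===== VERDICT (by name: the statement is the Claim_ definition above) =====
theorem insert_before_spec : Claim_equal_insert_before := by
  intro dictionary before_key insert_key insert_value _
  exact insert_before_spec_aux dictionary before_key insert_key insert_value
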